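-- pv_equiv track=rewrite | github.com/Zimmermann25/InterviewBit | BinarySearch/Python/MedianOfArray.py | lastOccIndex
-- ===== SOURCE A (Python) =====
-- def lastOccIndex(arr, val):
--     left = 0
--     right = len(arr) - 1
--     found = False
--     mid = (left + right) // 2
--     while left <= right:
--         mid = (left + right) // 2
--         if arr[mid] == val:
--             found = True
--             left = mid +1
--         elif arr[mid] < val:
--             left = mid + 1
--         else:
--             right = mid - 1
--     return (len(arr)- right - 1, found)# zwraca ile wartosci w tablicy jest WIEKSZYCH niz val
-- ===== SOURCE B (Python) =====
-- def lastOccIndex(arr, val):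
--     # Same comparison sequence as the while-loop version, but as a
--     # divide-and-conquer recursion carrying (start, segment length) instead
--     # of two moving Int pointers.
--     def go(left, n, found):
--         if n == 0:
--             return (len(arr) - left, found)
--         half = (n - 1) // 2
--         mid = left + half
--         if arr[mid] > val:
--             return go(left, half, found)
--         return go(mid + 1, n - 1 - half, found or arr[mid] == val)
--     return go(0, len(arr), False)
-- ===== Notes on version B (the rewrite author's own statement) =====
-- stated objective: alternative
-- what changed: The two-pointer (left,right) while loop is replaced by a divide-and-conquer recursion on (segment start, segment length) over natural numbers, with the >-comparison tested first and 'found' folded into the recursive argument.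
import Mathlib
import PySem

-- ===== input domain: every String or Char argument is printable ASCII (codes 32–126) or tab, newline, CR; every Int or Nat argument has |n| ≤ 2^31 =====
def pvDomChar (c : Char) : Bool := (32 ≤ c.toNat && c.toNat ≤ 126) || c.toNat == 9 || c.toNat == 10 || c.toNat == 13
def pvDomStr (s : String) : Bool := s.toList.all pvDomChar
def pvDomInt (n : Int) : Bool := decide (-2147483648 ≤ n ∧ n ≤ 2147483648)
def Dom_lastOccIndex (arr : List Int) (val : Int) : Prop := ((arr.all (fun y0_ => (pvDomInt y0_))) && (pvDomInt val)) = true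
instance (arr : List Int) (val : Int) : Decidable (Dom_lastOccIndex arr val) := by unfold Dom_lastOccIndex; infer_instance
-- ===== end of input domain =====

-- B replaces the two-pointer while loop by a divide-and-conquer recursion on
-- (segment start, segment length); same comparisons, same result (alternative).


-- ===== PORT A =====
-- A's while loop: two Int pointers left/right, flag found.
def lastOccLoopA (arr : List Int) (val : Int) (left right : Int) (found : Bool) : Int × Bool :=
  if h : left ≤ right then
    let mid := PySem.Int.floordiv (left + right) 2
    let x := PySem.List.pyGetD arr mid 0    -- arr[mid]; mid is in range whenever the loop is reached from the entry call
    if x = val then lastOccLoopA arr val (mid + 1) right true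
    else if x < val then lastOccLoopA arr val (mid + 1) right found
    else lastOccLoopA arr val left (mid - 1) found
  else ((arr.length : Int) - right - 1, found)
termination_by (right + 1 - left).toNat
decreasing_by
  · have := PySem.Int.floordiv_two_mid_bounds h; omega
  · have := PySem.Int.floordiv_two_mid_bounds h; omega
  · have := PySem.Int.floordiv_two_mid_bounds h; omega

def lastOccIndex (arr : List Int) (val : Int) : Int × Bool :=
  lastOccLoopA arr val 0 ((arr.length : Int) - 1) false

-- ===== PORT B =====
-- B's recursion: segment start `left` and length `n` as naturals.
def lastOccGoB (arr : List Int) (val : Int) (left n : Nat) (found : Bool) : Int × Bool :=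
  match n with
  | 0 => ((arr.length : Int) - left, found)
  | m + 1 =>
    let half := m / 2
    let mid := left + half
    let x := PySem.List.pyGetD arr (mid : Int) 0   -- arr[mid]; in range from the entry call
    if val < x then lastOccGoB arr val left half found
    else lastOccGoB arr val (mid + 1) (m - half) (found || decide (x = val))
termination_by n
decreasing_by all_goals omega

def lastOccIndex_alt (arr : List Int) (val : Int) : Int × Bool :=
  lastOccGoB arr val 0 arr.length false

-- ===== PRECONDITION & SPEC =====
def Spec_lastOccIndex (arr : List Int) (val : Int) (out : Int × Bool) : Prop := out = lastOccIndex_alt arr val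
instance (arr : List Int) (val : Int) (out : Int × Bool) : Decidable (Spec_lastOccIndex arr val out) := by unfold Spec_lastOccIndex; infer_instance

-- ===== CLAIM (what is proved, stated in full; the proofs are below) =====
def Claim_equal_lastOccIndex : Prop := ∀ (arr : List Int) (val : Int), Dom_lastOccIndex arr val → Spec_lastOccIndex arr val (lastOccIndex arr val)

-- ===== LEMMAS AND PROOFS =====

-- Loop/recursion correspondence: A's interval [left, left+n-1] versus B's (left, n).
lemma loopA_eq_goB (arr : List Int) (val : Int) :
    ∀ (n left : Nat) (found : Bool),
      lastOccLoopA arr val (left : Int) ((left : Int) + (n : Int) - 1) found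
        = lastOccGoB arr val left n found := by
  intro n
  induction n using Nat.strong_induction_on with
  | _ n ih =>
    intro left found
    match n with
    | 0 =>
      rw [lastOccLoopA, lastOccGoB]
      rw [dif_neg (by omega)]
      simp only [Prod.mk.injEq]
      exact ⟨by omega, trivial⟩
    | m + 1 =>
      rw [lastOccLoopA, lastOccGoB]
      rw [dif_pos (by push_cast; omega)]
      have hmid : PySem.Int.floordiv ((left : Int) + ((left : Int) + ((m + 1 : Nat) : Int) - 1)) 2
          = ((left + m / 2 : Nat) : Int) := by
        rw [PySem.Int.floordiv_eq_ediv_of_pos (by omega)]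
        push_cast
        omega
      rw [hmid]
      set x := PySem.List.pyGetD arr ((left + m / 2 : Nat) : Int) 0 with hx
      have h1 : ((left + m / 2 : Nat) : Int) + 1 = ((left + m / 2 + 1 : Nat) : Int) := by
        push_cast; ring
      have h2 : (left : Int) + ((m + 1 : Nat) : Int) - 1
          = ((left + m / 2 + 1 : Nat) : Int) + ((m - m / 2 : Nat) : Int) - 1 := by
        push_cast; omega
      have h3 : ((left + m / 2 : Nat) : Int) - 1 = (left : Int) + ((m / 2 : Nat) : Int) - 1 := by
        push_cast; ring
      by_cases heq : x = val
      · rw [if_pos heq, if_neg (show ¬ val < x by omega)]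
        rw [h1, h2, ih (m - m / 2) (by omega) (left + m / 2 + 1) true]
        simp [heq]
      · rw [if_neg heq]
        by_cases hlt : x < val
        · rw [if_pos hlt, if_neg (show ¬ val < x by omega)]
          rw [h1, h2, ih (m - m / 2) (by omega) (left + m / 2 + 1) found]
          simp [heq]
        · rw [if_neg hlt, if_pos (show val < x by omega)]
          rw [h3, ih (m / 2) (by omega) left found]

-- ===== VERDICT (by name: the statement is the Claim_ definition above) =====
theorem lastOccIndex_spec : Claim_equal_lastOccIndex := by
  intro arr val _
  unfold Spec_lastOccIndex lastOccIndex lastOccIndex_alt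
  have := loopA_eq_goB arr val arr.length 0 false
  simpa using this
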